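-- pv_equiv track=rewrite | github.com/bdemarzo/ai-workflows | bin/aiwf.py | _replace_section
-- ===== SOURCE A (Python) =====
-- def _replace_section(body: str, heading: str, new_lines: list[str]) -> str:
--     lines = body.rstrip("\n").splitlines()
--     if not lines:
--         lines = []
--
--     try:
--         start = next(i for i, line in enumerate(lines) if line.strip() == heading)
--     except StopIteration:
--         if lines:
--             lines.append("")
--         lines.append(heading)
--         lines.extend(new_lines)
--         return "\n".join(lines) + "\n"
--
--     end = len(lines)
--     for i in range(start + 1, len(lines)):
--         if lines[i].startswith("## "):
--             end = i
--             break
--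
--     updated = lines[: start + 1] + new_lines + lines[end:]
--     return "\n".join(updated) + "\n"
-- ===== SOURCE B (Python) =====
-- def _replace_section(body: str, heading: str, new_lines: list[str]) -> str:
--     out = []
--     state = 0  # 0 = heading not seen yet, 1 = skipping old section body, 2 = past the section
--     for line in body.rstrip("\n").splitlines():
--         if state == 1:
--             if line.startswith("## "):
--                 out.append(line)
--                 state = 2
--         elif state == 0 and line.strip() == heading:
--             out.append(line)
--             out.extend(new_lines)
--             state = 1
--         else:
--             out.append(line)
--     if state == 0:
--         if out:
--             out.append("")
--         out.append(heading)
--         out.extend(new_lines)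
--     return "\n".join(out) + "\n"
-- ===== Notes on version B (the rewrite author's own statement) =====
-- stated objective: alternative
-- what changed: Replaced A's index-based scheme (enumerate to find the heading index, a range scan for the next '## ' index, then list slicing/concatenation) with a single pass over the lines driven by a three-state flag that copies, injects and skips lines as it goes.
import Mathlib
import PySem

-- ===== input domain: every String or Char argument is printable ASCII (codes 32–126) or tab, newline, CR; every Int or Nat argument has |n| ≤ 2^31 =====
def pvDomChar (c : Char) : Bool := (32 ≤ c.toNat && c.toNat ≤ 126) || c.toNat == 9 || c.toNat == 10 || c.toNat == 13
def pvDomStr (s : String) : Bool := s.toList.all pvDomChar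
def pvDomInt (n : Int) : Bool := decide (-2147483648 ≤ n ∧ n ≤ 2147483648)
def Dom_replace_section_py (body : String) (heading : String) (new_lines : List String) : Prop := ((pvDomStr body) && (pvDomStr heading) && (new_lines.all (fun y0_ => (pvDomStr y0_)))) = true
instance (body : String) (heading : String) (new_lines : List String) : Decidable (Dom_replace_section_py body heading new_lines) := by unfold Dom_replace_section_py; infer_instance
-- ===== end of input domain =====

-- B replaces A's index arithmetic (find heading index, scan for the next '## ' index, slice)
-- with a single pass over the lines driven by a three-state flag; same cost, different decomposition.

-- shared literal helpers (both Pythons contain these exact expressions):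
-- body.rstrip("\n") — exact hand port (drops all trailing '\n' code points; PySem has no chars-argument rstrip)
def pvStripNl (s : String) : String := String.ofList ((s.toList.reverse.dropWhile (fun c => c == '\n')).reverse)
-- "\n".join(ls) + "\n" — via PySem.Chars.join, exact
def pvJoinNl (ls : List String) : String := String.ofList (PySem.Chars.join ['\n'] (ls.map String.toList) ++ ['\n'])

-- ===== PORT A =====
-- next(i for i, line in enumerate(lines) if line.strip() == heading), none = StopIteration
def pvFindStart (heading : String) : List String → Nat → Option Nat
  | [], _ => none
  | l :: ls, i => if PySem.Str.strip l == heading then some i else pvFindStart heading ls (i + 1)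

-- the 'for i in range(start+1, len(lines))' break-scan for the next '## ' line (returns len if none)
def pvFindEnd (lines : List String) (i : Nat) : Nat :=
  if h : i < lines.length then
    if PySem.Str.startswith lines[i] "## " then i else pvFindEnd lines (i + 1)
  else lines.length
termination_by lines.length - i

def replace_section_py (body : String) (heading : String) (new_lines : List String) : String :=
  let lines := PySem.Str.splitlines (pvStripNl body)
  -- 'if not lines: lines = []' is a no-op and is omitted
  match pvFindStart heading lines 0 with
  | none =>
      pvJoinNl ((if lines.isEmpty then lines else lines ++ [""]) ++ heading :: new_lines)
  | some start =>
      let e := pvFindEnd lines (start + 1)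
      pvJoinNl (lines.take (start + 1) ++ new_lines ++ lines.drop e)

-- ===== PORT B =====
-- one loop step of Source B: state 0 = heading not seen, 1 = skipping old section body, 2 = past it
def pvStep (heading : String) (new_lines : List String) (p : List String × Nat) (line : String) :
    List String × Nat :=
  if p.2 == 1 then
    if PySem.Str.startswith line "## " then (p.1 ++ [line], 2) else (p.1, 1)
  else if p.2 == 0 && (PySem.Str.strip line == heading) then
    (p.1 ++ [line] ++ new_lines, 1)
  else (p.1 ++ [line], p.2)

def replace_section_py_alt (body : String) (heading : String) (new_lines : List String) : String :=
  let r := (PySem.Str.splitlines (pvStripNl body)).foldl (pvStep heading new_lines) ([], 0)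
  let out := if r.2 == 0 then
      (if r.1.isEmpty then r.1 else r.1 ++ [""]) ++ heading :: new_lines
    else r.1
  pvJoinNl out

-- ===== PRECONDITION & SPEC =====
def Spec_replace_section_py (body : String) (heading : String) (new_lines : List String) (out : String) : Prop := out = replace_section_py_alt body heading new_lines
instance (body : String) (heading : String) (new_lines : List String) (out : String) : Decidable (Spec_replace_section_py body heading new_lines out) := by unfold Spec_replace_section_py; infer_instance

-- ===== CLAIM (what is proved, stated in full; the proofs are below) =====
def Claim_equal_replace_section_py : Prop := ∀ (body : String) (heading : String) (new_lines : List String), Dom_replace_section_py body heading new_lines → Spec_replace_section_py body heading new_lines (replace_section_py body heading new_lines)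

-- ===== LEMMAS AND PROOFS =====

-- once in state 2, the fold just copies
theorem pvStep_two (h : String) (nl : List String) :
    ∀ (ls : List String) (acc : List String),
      ls.foldl (pvStep h nl) (acc, 2) = (acc ++ ls, 2) := by
  intro ls
  induction ls with
  | nil => intro acc; simp
  | cons x xs ih =>
    intro acc
    simp only [List.foldl_cons, pvStep]
    simp [ih]

-- in state 1 the fold drops lines up to (exclusive) the first '## ' line, then copies
theorem pvStep_one (h : String) (nl : List String) :
    ∀ (ls : List String) (acc : List String),
      ls.foldl (pvStep h nl) (acc, 1) =
        (acc ++ ls.dropWhile (fun l => !(PySem.Str.startswith l "## ")),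
         if (ls.dropWhile (fun l => !(PySem.Str.startswith l "## "))).isEmpty then 1 else 2) := by
  intro ls
  induction ls with
  | nil => intro acc; simp
  | cons x xs ih =>
    intro acc
    by_cases hx : PySem.Chars.startswith x.toList ['#', '#', ' '] = true
    · have h1 : pvStep h nl (acc, 1) x = (acc ++ [x], 2) := by simp [pvStep, hx]
      rw [List.foldl_cons, h1, pvStep_two]
      simp [hx]
    · simp only [Bool.not_eq_true] at hx
      have h1 : pvStep h nl (acc, 1) x = (acc, 1) := by simp [pvStep, hx]
      rw [List.foldl_cons, h1, ih]
      simp [hx]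

-- in state 0 the fold reproduces A's take/insert/drop decomposition, phrased with takeWhile/dropWhile
theorem pvStep_zero (h : String) (nl : List String) :
    ∀ (ls : List String) (acc : List String),
      ls.foldl (pvStep h nl) (acc, 0) =
        match ls.dropWhile (fun l => !(PySem.Str.strip l == h)) with
        | [] => (acc ++ ls, 0)
        | m :: after =>
            (acc ++ ls.takeWhile (fun l => !(PySem.Str.strip l == h)) ++ m :: (nl ++
               after.dropWhile (fun l => !(PySem.Str.startswith l "## "))),
             if (after.dropWhile (fun l => !(PySem.Str.startswith l "## "))).isEmpty then 1 else 2) := by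
  intro ls
  induction ls with
  | nil => intro acc; simp
  | cons x xs ih =>
    intro acc
    by_cases hq : (PySem.Str.strip x == h) = true
    · have h1 : pvStep h nl (acc, 0) x = (acc ++ [x] ++ nl, 1) := by simp [pvStep, hq]
      rw [List.foldl_cons, h1, pvStep_one]
      simp [hq]
    · simp only [Bool.not_eq_true] at hq
      have h1 : pvStep h nl (acc, 0) x = (acc ++ [x], 0) := by simp [pvStep, hq]
      rw [List.foldl_cons, h1, ih]
      cases hdw : xs.dropWhile (fun l => !(PySem.Str.strip l == h)) with
      | nil => simp [hdw, hq]
      | cons m after => simp [hdw, hq]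

-- pvFindStart located at offset i = emptiness of the dropWhile + length of the takeWhile
theorem pvFindStart_eq (h : String) :
    ∀ (ls : List String) (i : Nat),
      pvFindStart h ls i =
        if (ls.dropWhile (fun l => !(PySem.Str.strip l == h))).isEmpty then none
        else some (i + (ls.takeWhile (fun l => !(PySem.Str.strip l == h))).length) := by
  intro ls
  induction ls with
  | nil => intro i; simp [pvFindStart]
  | cons x xs ih =>
    intro i
    simp only [pvFindStart, List.dropWhile_cons, List.takeWhile_cons]
    by_cases hx : (PySem.Str.strip x == h) = true
    · simp [hx]
    · simp only [Bool.not_eq_true] at hx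
      rw [ih (i + 1)]
      by_cases he : (xs.dropWhile (fun l => !(PySem.Str.strip l == h))).isEmpty = true
      · simp [hx, he]
      · simp only [he]
        simp [hx, he]
        omega

-- dropping at pvFindEnd = dropWhile-not-'## ' of the suffix from i
theorem pvFindEnd_drop :
    ∀ (ls : List String) (i : Nat),
      ls.drop (pvFindEnd ls i) =
        (ls.drop i).dropWhile (fun l => !(PySem.Str.startswith l "## ")) := by
  intro ls i
  induction hn : ls.length - i using Nat.strong_induction_on generalizing i with
  | _ n ih =>
    unfold pvFindEnd
    by_cases hlt : i < ls.length
    · have hdi : ls.drop i = ls[i] :: ls.drop (i + 1) := List.drop_eq_getElem_cons hlt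
      by_cases hs : PySem.Str.startswith ls[i] "## " = true
      · rw [dif_pos hlt, if_pos hs, hdi, List.dropWhile_cons, hs, Bool.not_true,
          if_neg Bool.false_ne_true]
      · simp only [Bool.not_eq_true] at hs
        rw [dif_pos hlt, if_neg (by rw [hs]; exact Bool.false_ne_true),
          ih (ls.length - (i + 1)) (by omega) (i + 1) rfl, hdi, List.dropWhile_cons, hs,
          Bool.not_false, if_pos rfl]
    · rw [dif_neg hlt]
      rw [List.drop_of_length_le (le_refl ls.length),
        List.drop_of_length_le (by omega : ls.length ≤ i)]
      rfl

-- the core equality on any list of lines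
theorem core_eq (h : String) (nl : List String) (ls : List String) :
    (match pvFindStart h ls 0 with
     | none => pvJoinNl ((if ls.isEmpty then ls else ls ++ [""]) ++ h :: nl)
     | some start => pvJoinNl (ls.take (start + 1) ++ nl ++ ls.drop (pvFindEnd ls (start + 1)))) =
    (let r := ls.foldl (pvStep h nl) ([], 0)
     let out := if r.2 == 0 then (if r.1.isEmpty then r.1 else r.1 ++ [""]) ++ h :: nl else r.1
     pvJoinNl out) := by
  rw [pvFindStart_eq, pvStep_zero]
  cases hdw : ls.dropWhile (fun l => !(PySem.Str.strip l == h)) with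
  | nil => simp
  | cons m after =>
    have hsplit : ls = ls.takeWhile (fun l => !(PySem.Str.strip l == h)) ++ m :: after := by
      conv_lhs => rw [← List.takeWhile_append_dropWhile
        (p := fun l => !(PySem.Str.strip l == h)) (l := ls)]
      rw [hdw]
    set t := ls.takeWhile (fun l => !(PySem.Str.strip l == h)) with ht
    have htake : ls.take (t.length + 1) = t ++ [m] := by
      conv_lhs => rw [hsplit]
      rw [List.take_append]
      simp
    have hdrop : ls.drop (t.length + 1) = after := by
      conv_lhs => rw [hsplit]
      rw [List.drop_append]
      simp
    have hst : ((if (after.dropWhile (fun l => !(PySem.Str.startswith l "## "))).isEmpty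
        then (1 : Nat) else 2) == 0) = false := by split <;> rfl
    simp only [List.isEmpty_cons, Bool.false_eq_true, if_false, Nat.zero_add, hst,
      pvFindEnd_drop, htake, hdrop]
    simp

-- ===== VERDICT (by name: the statement is the Claim_ definition above) =====
set_option maxHeartbeats 2000000 in
theorem replace_section_py_spec : Claim_equal_replace_section_py := by
  intro body heading new_lines _
  unfold Spec_replace_section_py
  exact core_eq heading new_lines (PySem.Str.splitlines (pvStripNl body))
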